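-- pv_equiv track=rewrite | github.com/BinW3g/AdventOfCode | 4Day/bingo.py | is_pingo
-- ===== SOURCE A (Python) =====
-- def is_pingo(board, y, z, check_into_direction, deep):
--     if (0 <= y <= 4) and (0 <= z <= 4):
--         is_set = board[y][z] == -1
--         if is_set:
--             deep += 1
--             if check_into_direction == 'u':
--                 result = is_pingo(board, y - 1, z, check_into_direction, deep)
--                 return result[0], result[1]
--             elif check_into_direction == 'd':
--                 result = is_pingo(board, y + 1, z, check_into_direction, deep)
--                 return result[0], result[1]
--             elif check_into_direction == 'l':
--                 result = is_pingo(board, y, z - 1, check_into_direction, deep)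
--                 return result[0], result[1]
--             elif check_into_direction == 'r':
--                 result = is_pingo(board, y, z + 1, check_into_direction, deep)
--                 return result[0], result[1]
--             elif check_into_direction == 'dtl':
--                 result = is_pingo(board, y - 1, z - 1, check_into_direction, deep)
--                 return result[0], result[1]
--             elif check_into_direction == 'ddr':
--                 result = is_pingo(board, y + 1, z + 1, check_into_direction, deep)
--                 return result[0], result[1]
--             elif check_into_direction == 'dtr':
--                 result = is_pingo(board, y - 1, z - 1, check_into_direction, deep)
--                 return result[0], result[1]
--             elif check_into_direction == 'ddl':
--                 result = is_pingo(board, y + 1, z + 1, check_into_direction, deep)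
--                 return result[0], result[1]
--         else:
--             return is_set, deep
--     else:
--         return True, deep
-- ===== SOURCE B (Python) =====
-- DELTAS = {'u': (-1, 0), 'd': (1, 0), 'l': (0, -1), 'r': (0, 1),
--           'dtl': (-1, -1), 'ddr': (1, 1), 'dtr': (-1, -1), 'ddl': (1, 1)}
--
--
-- def is_pingo(board, y, z, check_into_direction, deep):
--     while 0 <= y <= 4 and 0 <= z <= 4:
--         if board[y][z] != -1:
--             return False, deep
--         deep += 1
--         dy, dz = DELTAS[check_into_direction]
--         y += dy
--         z += dz
--     return True, deep
-- ===== Notes on version B (the rewrite author's own statement) =====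
-- stated objective: simpler
-- what changed: Replaces the recursion with its duplicated eight-branch elif chain by an iterative while loop driven by a direction->(dy,dz) delta table looked up once per step.
-- outside the precondition, e.g. on is_pingo([[-1]], 0, 0, 'x', 0): A returns None, B raises KeyError
import Mathlib
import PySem

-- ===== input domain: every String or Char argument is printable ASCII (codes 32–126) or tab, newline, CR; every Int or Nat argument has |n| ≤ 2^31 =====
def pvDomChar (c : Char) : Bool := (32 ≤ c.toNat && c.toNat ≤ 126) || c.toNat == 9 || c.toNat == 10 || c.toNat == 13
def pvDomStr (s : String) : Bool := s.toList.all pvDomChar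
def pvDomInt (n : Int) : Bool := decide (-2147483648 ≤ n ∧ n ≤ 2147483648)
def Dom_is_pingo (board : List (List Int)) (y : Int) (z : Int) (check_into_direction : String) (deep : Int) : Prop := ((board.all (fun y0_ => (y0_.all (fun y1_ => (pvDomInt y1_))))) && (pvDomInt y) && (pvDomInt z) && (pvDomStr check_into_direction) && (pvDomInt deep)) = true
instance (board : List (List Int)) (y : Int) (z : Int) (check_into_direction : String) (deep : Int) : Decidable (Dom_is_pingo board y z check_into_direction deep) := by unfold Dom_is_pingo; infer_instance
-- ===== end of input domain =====

-- B replaces A's recursion with its duplicated eight-branch elif chain by an iterative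
-- while loop driven by a direction → (dy, dz) delta table (objective: simpler).

-- ===== PORT A =====
-- A is recursive; every chain of calls leaves the 5×5 in-bounds region within at most
-- 6 nested calls, so we transliterate with a fuel counter that never runs out (fuel 16).
-- Python's board[y][z] raises IndexError when the row/cell is missing (excluded by
-- Pre_); the port reads with a default there. A's fall-through 'return None' on an
-- unknown direction with a marked cell (excluded by Pre_) is rendered as (false, deep).
def isPingoFuelA : Nat → List (List Int) → Int → Int → String → Int → Bool × Int
  | 0, _, _, _, _, deep => (true, deep)
  | fuel+1, board, y, z, dir, deep =>
    if (0 ≤ y ∧ y ≤ 4) ∧ (0 ≤ z ∧ z ≤ 4) then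
      let is_set : Bool :=
        ((PySem.List.pyGet? ((PySem.List.pyGet? board y).getD []) z).getD 0) == -1
      if is_set then
        let deep := deep + 1
        if dir == "u" then isPingoFuelA fuel board (y - 1) z dir deep
        else if dir == "d" then isPingoFuelA fuel board (y + 1) z dir deep
        else if dir == "l" then isPingoFuelA fuel board y (z - 1) dir deep
        else if dir == "r" then isPingoFuelA fuel board y (z + 1) dir deep
        else if dir == "dtl" then isPingoFuelA fuel board (y - 1) (z - 1) dir deep
        else if dir == "ddr" then isPingoFuelA fuel board (y + 1) (z + 1) dir deep
        else if dir == "dtr" then isPingoFuelA fuel board (y - 1) (z - 1) dir deep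
        else if dir == "ddl" then isPingoFuelA fuel board (y + 1) (z + 1) dir deep
        else (false, deep)      -- Python: falls through and returns None (outside Pre_)
      else (is_set, deep)
    else (true, deep)

def is_pingo (board : List (List Int)) (y : Int) (z : Int) (check_into_direction : String) (deep : Int) : Bool × Int :=
  isPingoFuelA 16 board y z check_into_direction deep

-- ===== PORT B =====
-- the dict DELTAS of Source B
def pvDeltas : PySem.Dict String (Int × Int) :=
  PySem.Dict.ofList [("u", (-1, 0)), ("d", (1, 0)), ("l", (0, -1)), ("r", (0, 1)),
                     ("dtl", (-1, -1)), ("ddr", (1, 1)), ("dtr", (-1, -1)), ("ddl", (1, 1))]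

-- Source B's while loop, transliterated with the same fuel bound; a missing cell reads a
-- default (Python raises IndexError there, outside Pre_) and a missing DELTAS key
-- (Python raises KeyError, outside Pre_) is rendered as (true, deep).
def isPingoFuelB : Nat → List (List Int) → Int → Int → String → Int → Bool × Int
  | 0, _, _, _, _, deep => (true, deep)
  | fuel+1, board, y, z, dir, deep =>
    if (0 ≤ y ∧ y ≤ 4) ∧ (0 ≤ z ∧ z ≤ 4) then
      if ((PySem.List.pyGet? ((PySem.List.pyGet? board y).getD []) z).getD 0) != -1 then
        (false, deep)
      else
        let deep := deep + 1
        match PySem.Dict.get? pvDeltas dir with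
        | some (dy, dz) => isPingoFuelB fuel board (y + dy) (z + dz) dir deep
        | none => (true, deep)      -- Python: raises KeyError (outside Pre_)
    else (true, deep)

def is_pingo_alt (board : List (List Int)) (y : Int) (z : Int) (check_into_direction : String) (deep : Int) : Bool × Int :=
  isPingoFuelB 16 board y z check_into_direction deep

-- ===== PRECONDITION & SPEC =====
-- helpers for Pre_ (used by neither port): bounds test, a total cell read, the delta table
def pvInb (y z : Int) : Bool := decide ((0 ≤ y ∧ y ≤ 4) ∧ (0 ≤ z ∧ z ≤ 4))

def pvCellAt (board : List (List Int)) (y z : Int) : Option Int :=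
  (PySem.List.pyGet? board y).bind (fun row => PySem.List.pyGet? row z)

def pvDelta? (dir : String) : Option (Int × Int) :=
  if dir = "u" then some (-1, 0) else if dir = "d" then some (1, 0)
  else if dir = "l" then some (0, -1) else if dir = "r" then some (0, 1)
  else if dir = "dtl" then some (-1, -1) else if dir = "ddr" then some (1, 1)
  else if dir = "dtr" then some (-1, -1) else if dir = "ddl" then some (1, 1)
  else none

-- Pre_ admits exactly the inputs on which A returns a pair: it excludes the inputs
-- where A raises IndexError (a missing row/cell is read along the chain of marked
-- cells) and those where A returns None instead of a pair (an unknown direction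
-- string reached with a marked cell).
def Pre_is_pingo (board : List (List Int)) (y : Int) (z : Int) (check_into_direction : String) (deep : Int) : Prop :=
  pvInb y z = false ∨
  ((pvDelta? check_into_direction = none →
      (pvCellAt board y z).any (fun c => c != -1) = true)
   ∧ ∀ p ∈ (pvDelta? check_into_direction).toList, ∀ k ∈ List.range 5,
       pvInb (y + (k : Int) * p.1) (z + (k : Int) * p.2) = true →
       (∀ j ∈ List.range k, pvCellAt board (y + (j : Int) * p.1) (z + (j : Int) * p.2) = some (-1)) →
       (pvCellAt board (y + (k : Int) * p.1) (z + (k : Int) * p.2)).isSome = true)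

instance (board : List (List Int)) (y : Int) (z : Int) (check_into_direction : String) (deep : Int) : Decidable (Pre_is_pingo board y z check_into_direction deep) := by unfold Pre_is_pingo; infer_instance

def pvWitness_is_pingo : List (List Int) × Int × Int × String × Int :=
  ([[-1, 0, 0, 0, 0], [0, 0, 0, 0, 0], [0, 0, 0, 0, 0], [0, 0, 0, 0, 0], [0, 0, 0, 0, 0]], 0, 0, "r", 0)

def Spec_is_pingo (board : List (List Int)) (y : Int) (z : Int) (check_into_direction : String) (deep : Int) (out : Bool × Int) : Prop := out = is_pingo_alt board y z check_into_direction deep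
instance (board : List (List Int)) (y : Int) (z : Int) (check_into_direction : String) (deep : Int) (out : Bool × Int) : Decidable (Spec_is_pingo board y z check_into_direction deep out) := by unfold Spec_is_pingo; infer_instance

-- ===== CLAIM (what is proved, stated in full; the proofs are below) =====
def Claim_equal_is_pingo : Prop := ∀ (board : List (List Int)) (y : Int) (z : Int) (check_into_direction : String) (deep : Int), Dom_is_pingo board y z check_into_direction deep → Pre_is_pingo board y z check_into_direction deep → Spec_is_pingo board y z check_into_direction deep (is_pingo board y z check_into_direction deep)

-- ===== LEMMAS AND PROOFS =====

-- a successful cell lookup is what both ports' defaulted read returns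
lemma pvCell_of_cellAt {board : List (List Int)} {y z c : Int}
    (h : pvCellAt board y z = some c) :
    (PySem.List.pyGet? ((PySem.List.pyGet? board y).getD []) z).getD 0 = c := by
  unfold pvCellAt at h
  cases hrow : PySem.List.pyGet? board y with
  | none => simp [hrow] at h
  | some row => rw [hrow, Option.bind_some] at h; simp [h]

-- the ray condition of Pre_ survives one step along the direction's delta
lemma ray_shift (board : List (List Int)) (y z dy dz : Int)
    (hinb : pvInb y z = true)
    (hunit : dy = -1 ∨ dy = 1 ∨ dz = -1 ∨ dz = 1)
    (h0 : pvCellAt board y z = some (-1))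
    (hray : ∀ k ∈ List.range 5, pvInb (y + (k : Int) * dy) (z + (k : Int) * dz) = true →
        (∀ j ∈ List.range k, pvCellAt board (y + (j : Int) * dy) (z + (j : Int) * dz) = some (-1)) →
        (pvCellAt board (y + (k : Int) * dy) (z + (k : Int) * dz)).isSome = true) :
    ∀ k ∈ List.range 5, pvInb (y + dy + (k : Int) * dy) (z + dz + (k : Int) * dz) = true →
        (∀ j ∈ List.range k, pvCellAt board (y + dy + (j : Int) * dy) (z + dz + (j : Int) * dz) = some (-1)) →
        (pvCellAt board (y + dy + (k : Int) * dy) (z + dz + (k : Int) * dz)).isSome = true := by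
  intro k hk hin hall
  simp only [List.mem_range] at hk
  by_cases hk4 : k = 4
  · exfalso
    subst hk4
    have hb : (0 ≤ y ∧ y ≤ 4) ∧ (0 ≤ z ∧ z ≤ 4) := by
      simpa [pvInb] using hinb
    have hb' : (0 ≤ y + dy + (4 : Int) * dy ∧ y + dy + (4 : Int) * dy ≤ 4) ∧
        (0 ≤ z + dz + (4 : Int) * dz ∧ z + dz + (4 : Int) * dz ≤ 4) := by
      simpa [pvInb] using hin
    rcases hunit with h | h | h | h <;> subst h <;> omega
  · have hk' : k + 1 < 5 := by omega
    have hy : y + ((k + 1 : Nat) : Int) * dy = y + dy + (k : Int) * dy := by push_cast; ring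
    have hz : z + ((k + 1 : Nat) : Int) * dz = z + dz + (k : Int) * dz := by push_cast; ring
    have := hray (k + 1) (List.mem_range.mpr hk') (by rw [hy, hz]; exact hin) ?_
    · rwa [hy, hz] at this
    · intro j hj
      simp only [List.mem_range] at hj
      match j with
      | 0 => simpa using h0
      | j + 1 =>
        have hy' : y + ((j + 1 : Nat) : Int) * dy = y + dy + (j : Int) * dy := by push_cast; ring
        have hz' : z + ((j + 1 : Nat) : Int) * dz = z + dz + (j : Int) * dz := by push_cast; ring
        rw [hy', hz']
        exact hall j (List.mem_range.mpr (by omega))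

-- core equivalence: with the same fuel, A's recursion and B's loop agree on Pre_
lemma fuel_eq (n : Nat) (board : List (List Int)) :
    ∀ (y z : Int) (dir : String) (deep : Int), Pre_is_pingo board y z dir deep →
      isPingoFuelA n board y z dir deep = isPingoFuelB n board y z dir deep := by
  induction n with
  | zero => intro y z dir deep _; rfl
  | succ n ih =>
    intro y z dir deep hpre
    cases hbv : pvInb y z with
    | false =>
      have hb : ¬ ((0 ≤ y ∧ y ≤ 4) ∧ (0 ≤ z ∧ z ≤ 4)) := by
        simpa [pvInb] using hbv
      simp [isPingoFuelA, isPingoFuelB, hb]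
    | true =>
      have hb : (0 ≤ y ∧ y ≤ 4) ∧ (0 ≤ z ∧ z ≤ 4) := by
        simpa [pvInb] using hbv
      rcases hpre with hfalse | ⟨Hnone, Hray⟩
      · rw [hbv] at hfalse; exact absurd hfalse (by simp)
      cases hd : pvDelta? dir with
      | none =>
        have hcell := Hnone hd
        cases hc : pvCellAt board y z with
        | none => rw [hc] at hcell; simp [Option.any] at hcell
        | some c =>
          rw [hc] at hcell
          have hcne : (c == -1) = false := by
            simpa [Option.any, bne] using hcell
          have hread := pvCell_of_cellAt hc
          simp [isPingoFuelA, isPingoFuelB, hb, hread, hcne, bne]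
      | some p =>
        obtain ⟨dy, dz⟩ := p
        have hsome := Hray (dy, dz) (by rw [hd]; simp) 0 (by simp)
          (by simpa [pvInb] using hbv) (by simp)
        simp only [Nat.cast_zero, zero_mul, add_zero] at hsome
        cases hc : pvCellAt board y z with
        | none => rw [hc] at hsome; simp at hsome
        | some c =>
          have hread := pvCell_of_cellAt hc
          by_cases hcv : c = -1
          · -- marked cell: both step along (dy, dz); use the IH with the shifted Pre_
            subst hcv
            have hray0 := Hray (dy, dz) (by rw [hd]; simp)
            have hpre' : (dy = -1 ∨ dy = 1 ∨ dz = -1 ∨ dz = 1) →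
                Pre_is_pingo board (y + dy) (z + dz) dir (deep + 1) := by
              intro hunit
              refine Or.inr ⟨?_, ?_⟩
              · intro h
                rw [hd] at h
                cases h
              intro p hp
              rw [hd] at hp
              simp only [Option.toList_some, List.mem_singleton] at hp
              subst hp
              exact ray_shift board y z dy dz hbv hunit hc hray0
            -- determine the direction from pvDelta? and step both ports
            have hdir : dir = "u" ∨ dir = "d" ∨ dir = "l" ∨ dir = "r" ∨
                dir = "dtl" ∨ dir = "ddr" ∨ dir = "dtr" ∨ dir = "ddl" := by
              by_contra hcon
              push_neg at hcon
              obtain ⟨n1, n2, n3, n4, n5, n6, n7, n8⟩ := hcon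
              simp [pvDelta?, n1, n2, n3, n4, n5, n6, n7, n8] at hd
            have hku : PySem.Dict.get? pvDeltas "u" = some ((-1 : Int), (0 : Int)) := rfl
            have hkd : PySem.Dict.get? pvDeltas "d" = some ((1 : Int), (0 : Int)) := rfl
            have hkl : PySem.Dict.get? pvDeltas "l" = some ((0 : Int), (-1 : Int)) := rfl
            have hkr : PySem.Dict.get? pvDeltas "r" = some ((0 : Int), (1 : Int)) := rfl
            have hk1 : PySem.Dict.get? pvDeltas "dtl" = some ((-1 : Int), (-1 : Int)) := rfl
            have hk2 : PySem.Dict.get? pvDeltas "ddr" = some ((1 : Int), (1 : Int)) := rfl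
            have hk3 : PySem.Dict.get? pvDeltas "dtr" = some ((-1 : Int), (-1 : Int)) := rfl
            have hk4 : PySem.Dict.get? pvDeltas "ddl" = some ((1 : Int), (1 : Int)) := rfl
            rcases hdir with h | h | h | h | h | h | h | h <;>
              · subst h
                simp only [pvDelta?, Option.some.injEq, Prod.mk.injEq, String.reduceEq,
                  if_true, if_false, reduceIte] at hd
                obtain ⟨rfl, rfl⟩ := hd
                simp only [isPingoFuelA, isPingoFuelB, hb, hread, hku, hkd, hkl, hkr,
                  hk1, hk2, hk3, hk4, and_self, if_true, bne_self_eq_false,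
                  beq_self_eq_true, ite_false, Bool.false_eq_true, String.reduceBEq,
                  reduceIte]
                simpa [sub_eq_add_neg] using ih _ _ _ _ (hpre' (by norm_num))
          · have hcne : (c == -1) = false := by simp [hcv]
            simp [isPingoFuelA, isPingoFuelB, hb, hread, hcne, bne]

-- ===== VERDICT (by name: the statement is the Claim_ definition above) =====
theorem is_pingo_spec : Claim_equal_is_pingo := by
  intro board y z dir deep _ hpre
  unfold Spec_is_pingo is_pingo is_pingo_alt
  exact fuel_eq 16 board y z dir deep hpre
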